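-- pv_equiv track=rewrite | github.com/SatyakiDey75/LeetCode-Satyaki_75 | problems/2639-separate-the-digits-in-an-array/separate-the-digits-in-an-array.py | separateDigits
-- ===== SOURCE A (Python) =====
-- def separateDigits(nums):
--     # optimised:
--     s=[]
--     for i in nums:
--         t=[]
--         while i>0:
--             t.append(i%10)
--             i//=10
--         s.extend(t[::-1])
--     return s
-- ===== SOURCE B (Python) =====
-- def separateDigits(nums):
--     # Digits in order via str(), no modulo/reverse; i > 0 matches A's while-loop,
--     # which emits no digits for zero or negative numbers.
--     return [int(c) for i in nums if i > 0 for c in str(i)]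
-- ===== Notes on version B (the rewrite author's own statement) =====
-- stated objective: idiomatic
-- what changed: Replaces the per-number modulo/floor-division extraction into a temporary list followed by a reversing slice with a single flat comprehension over the characters of str(i), which yields the digits already in order.
import Mathlib
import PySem

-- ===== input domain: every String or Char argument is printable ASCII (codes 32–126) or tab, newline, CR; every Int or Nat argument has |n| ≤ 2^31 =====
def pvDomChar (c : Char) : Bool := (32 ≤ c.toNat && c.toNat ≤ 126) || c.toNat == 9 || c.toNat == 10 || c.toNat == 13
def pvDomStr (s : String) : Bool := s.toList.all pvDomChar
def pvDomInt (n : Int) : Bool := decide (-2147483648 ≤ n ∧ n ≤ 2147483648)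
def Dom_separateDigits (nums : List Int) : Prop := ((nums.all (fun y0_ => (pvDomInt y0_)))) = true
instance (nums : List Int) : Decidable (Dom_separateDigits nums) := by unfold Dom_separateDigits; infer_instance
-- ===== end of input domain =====

-- B replaces A's modulo/floor-division digit extraction plus reversing slice by a
-- flat comprehension over the characters of str(i); same values, same cost.

-- ===== PORT A =====
-- the 'while i > 0: t.append(i % 10); i //= 10' loop, carrying t
def pvLoopA (i : Int) (t : List Int) : List Int :=
  if _h : 0 < i then
    pvLoopA (PySem.Int.floordiv i 10) (t ++ [PySem.Int.mod i 10])
  else t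
termination_by i.toNat
decreasing_by
  rw [PySem.Int.floordiv_eq_ediv_of_pos (by omega)]; omega

def separateDigits (nums : List Int) : List Int :=
  nums.foldl
    (fun s i => s ++ ((PySem.List.slice? (pvLoopA i []) none none (-1)).getD []))
    []
  -- t[::-1]: slice? is never none for step -1; .getD [] only discharges the Option

-- ===== PORT B =====
-- int(c) for a single character c; ofChars? is never none on the digit chars of str(i)
def pvIntChar (c : Char) : Int := (PySem.Int.ofChars? [c]).getD 0

def separateDigits_alt (nums : List Int) : List Int :=
  nums.flatMap (fun i =>
    if 0 < i then (PySem.Int.toChars i).map pvIntChar else [])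

-- ===== PRECONDITION & SPEC =====
def Spec_separateDigits (nums : List Int) (out : List Int) : Prop := out = separateDigits_alt nums
instance (nums : List Int) (out : List Int) : Decidable (Spec_separateDigits nums out) := by unfold Spec_separateDigits; infer_instance

-- ===== CLAIM (what is proved, stated in full; the proofs are below) =====
def Claim_equal_separateDigits : Prop := ∀ (nums : List Int), Dom_separateDigits nums → Spec_separateDigits nums (separateDigits nums)

-- ===== LEMMAS AND PROOFS =====

-- A's digit list, least-significant first (proof-side characterisation of pvLoopA)
def pvAdig (i : Int) : List Int :=
  if _h : 0 < i then PySem.Int.mod i 10 :: pvAdig (PySem.Int.floordiv i 10) else []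
termination_by i.toNat
decreasing_by
  rw [PySem.Int.floordiv_eq_ediv_of_pos (by omega)]; omega

lemma pvLoopA_eq (i : Int) (t : List Int) : pvLoopA i t = t ++ pvAdig i := by
  induction i using pvAdig.induct generalizing t with
  | case1 i h ih =>
    rw [pvLoopA, pvAdig, dif_pos h, dif_pos h, ih, List.append_assoc]
    rfl
  | case2 i h =>
    rw [pvLoopA, pvAdig, dif_neg h, dif_neg h, List.append_nil]

lemma pvIntChar_digitChar (d : Nat) (hd : d < 10) :
    pvIntChar (Nat.digitChar d) = (d : Int) := by
  interval_cases d <;> decide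

lemma pvAdig_natCast (n : Nat) (hn : 0 < n) :
    pvAdig (n : Int) = ((n % 10 : Nat) : Int) :: pvAdig ((n / 10 : Nat) : Int) := by
  rw [pvAdig, dif_pos (by exact_mod_cast hn),
    PySem.Int.mod_eq_emod_of_pos (by norm_num), PySem.Int.floordiv_eq_ediv_of_pos (by norm_num)]
  rw [Int.natCast_mod, Int.natCast_div]; norm_num

lemma toDigitsCore_map (f : Nat) : ∀ (n : Nat) (l : List Char), n < f → 0 < n →
    (Nat.toDigitsCore 10 f n l).map pvIntChar = (pvAdig (n : Int)).reverse ++ l.map pvIntChar := by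
  induction f with
  | zero => intro n l hf; omega
  | succ f ih =>
    intro n l hf hn
    rw [Nat.toDigitsCore]
    by_cases h : n / 10 = 0
    · rw [if_pos h]
      rw [pvAdig_natCast n hn, h, pvAdig, dif_neg (by simp)]
      simp [pvIntChar_digitChar (n % 10) (Nat.mod_lt _ (by omega))]
    · rw [if_neg h]
      rw [ih (n / 10) _ (by omega) (Nat.pos_of_ne_zero h)]
      rw [pvAdig_natCast n hn]
      simp [pvIntChar_digitChar (n % 10) (Nat.mod_lt _ (by omega))]

-- per-element agreement: A's reversed extraction = B's string traversal
lemma pvStep_eq (i : Int) :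
    (PySem.List.slice? (pvLoopA i []) none none (-1)).getD []
      = (if 0 < i then (PySem.Int.toChars i).map pvIntChar else []) := by
  rw [pvLoopA_eq, List.nil_append, PySem.List.slice?_none_none_neg_one, Option.getD_some]
  by_cases h : 0 < i
  · rw [if_pos h]
    rw [PySem.Int.toChars, if_neg (by omega), Nat.toDigits]
    rw [toDigitsCore_map (i.toNat + 1) i.toNat [] (by omega) (by omega)]
    rw [Int.toNat_of_nonneg (by omega)]
    simp
  · rw [if_neg h, pvAdig, dif_neg h, List.reverse_nil]

-- ===== VERDICT (by name: the statement is the Claim_ definition above) =====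
theorem separateDigits_spec : Claim_equal_separateDigits := by
  intro nums _
  unfold Spec_separateDigits separateDigits separateDigits_alt
  rw [PySem.List.foldl_append_eq_flatMap
      (fun i => (PySem.List.slice? (pvLoopA i []) none none (-1)).getD []) nums []]
  simp only [List.nil_append]
  congr 1
  funext i
  exact pvStep_eq i
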